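/- GENERATED by farm/mkstatement.py from design/units.tsv (unit `DGifSetupDecompress.E`) and the assertions of Gif/Spec/Seg_DGifSetupDecompress.lean — do not edit.
   THE STATEMENT of the proof unit `DGifSetupDecompress.E`: segment E of `DGifSetupDecompress` (9 instructions; entries 0x10633a;
   exits ret; ranges 0x10633a-0x106354)
   takes each of its entry assertions to one of its exit assertions (`Gif.Spec.DGifSetupDecompress.SegE`), given the contracts of its callees.
   What the names mean: ProgX/Base/Spec/Basic.lean (the shared hypotheses), Gif/Spec/Seg_DGifSetupDecompress.lean (the assertions). The theorem to prove:
   `theorem DGifSetupDecompress_E_ok : Gif.Spec.DGifSetupDecompress_E.Statement`. -/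
import Gif.Code
import Gif.Dec.All
import Gif.Labels
import Gif.Spec.Seg_DGifSetupDecompress
namespace Gif.Spec.DGifSetupDecompress_E
open X86 X86.User Asan

/-- The statement of unit `DGifSetupDecompress.E`. -/
def Statement : Prop :=
  ∀ (Lay : Layout) (_hLay : Lay.hi = 0x1000000) (μ : Microarch) (_hμ : UserX.MicroOK μ) (u₀ : State)
    (_hcode : HasCodeNat Lay u₀ Gif.L.DGifSetupDecompress.entry Gif.Code.code_DGifSetupDecompress.nat Gif.L.DGifSetupDecompress.size),
    Gif.Spec.DGifSetupDecompress.SegE Lay μ u₀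

end Gif.Spec.DGifSetupDecompress_E
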